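-- pv_equiv track=rewrite | github.com/teodora1maximiuc/Python_Project | lab2.py | exercitiul_6
-- ===== SOURCE A (Python) =====
-- def exercitiul_6(s):
--     found = 0
--     numberString = []
--     for ch in s:
--         if ch.isnumeric():
--             numberString.append(ch)
--             found = 1
--         else:
--             if found == 1:
--                 break
--     numberString = ''.join(numberString)
--     return numberString
-- ===== SOURCE B (Python) =====
-- def exercitiul_6(s):
--     # Right-to-left dynamic programming: for each suffix keep
--     #   lead  = the digit run at the very start of the suffix
--     #   first = the first digit run anywhere in the suffix
--     lead, first = '', ''
--     for ch in reversed(s):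
--         if ch.isnumeric():
--             lead = ch + lead
--             first = lead
--         else:
--             lead = ''
--     return first
-- ===== Notes on version B (the rewrite author's own statement) =====
-- stated objective: alternative
-- what changed: Replaces the left-to-right flag-driven loop with a right-to-left dynamic-programming pass maintaining for each suffix the pair (digit run at the start of the suffix, first digit run in the suffix).
import Mathlib
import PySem

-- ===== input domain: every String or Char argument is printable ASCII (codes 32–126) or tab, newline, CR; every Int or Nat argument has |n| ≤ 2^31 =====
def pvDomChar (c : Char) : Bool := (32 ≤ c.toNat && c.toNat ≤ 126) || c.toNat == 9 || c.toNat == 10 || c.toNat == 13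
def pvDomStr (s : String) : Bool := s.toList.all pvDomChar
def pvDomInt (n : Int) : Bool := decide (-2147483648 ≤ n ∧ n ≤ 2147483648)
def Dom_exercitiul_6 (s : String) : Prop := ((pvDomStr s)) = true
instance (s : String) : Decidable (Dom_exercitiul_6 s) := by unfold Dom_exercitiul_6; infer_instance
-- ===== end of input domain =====

-- B traverses right-to-left with a DP pair instead of A's flagged left-to-right loop.
-- ===== PORT A =====
-- A: one loop with a 'found' flag, appending numeric chars and breaking at the
-- first non-numeric char after the run started.
def pvLoopA : List Char → Bool → List Char
  | [], _ => []
  | c :: cs, found =>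
    if PySem.Chars.isdigit c then c :: pvLoopA cs true
    else if found then [] else pvLoopA cs found

def exercitiul_6 (s : String) : String := String.ofList (pvLoopA s.toList false)

-- ===== PORT B =====
-- B: right-to-left pass; state = (digit run at start of suffix, first digit run in suffix).
def pvStepB (c : Char) (st : List Char × List Char) : List Char × List Char :=
  if PySem.Chars.isdigit c then (c :: st.1, c :: st.1) else ([], st.2)

def exercitiul_6_alt (s : String) : String :=
  String.ofList (s.toList.foldr pvStepB ([], [])).2

-- ===== PRECONDITION & SPEC =====
def Spec_exercitiul_6 (s : String) (out : String) : Prop := out = exercitiul_6_alt s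
instance (s : String) (out : String) : Decidable (Spec_exercitiul_6 s out) := by unfold Spec_exercitiul_6; infer_instance

-- ===== CLAIM =====
def Claim_equal_exercitiul_6 : Prop := ∀ (s : String), Dom_exercitiul_6 s → Spec_exercitiul_6 s (exercitiul_6 s)

-- ===== LEMMAS AND PROOFS =====
theorem pvLoopA_true (cs : List Char) :
    pvLoopA cs true = cs.takeWhile (fun c => PySem.Chars.isdigit c) := by
  induction cs with
  | nil => rfl
  | cons c cs ih =>
    simp only [pvLoopA, List.takeWhile]
    by_cases h : PySem.Chars.isdigit c <;> simp [h, ih]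

theorem pvFoldB_spec (cs : List Char) :
    (cs.foldr pvStepB ([], [])).1 = cs.takeWhile (fun c => PySem.Chars.isdigit c) ∧
    (cs.foldr pvStepB ([], [])).2 = pvLoopA cs false := by
  induction cs with
  | nil => exact ⟨rfl, rfl⟩
  | cons c cs ih =>
    simp only [List.foldr, pvStepB, pvLoopA, List.takeWhile]
    by_cases h : PySem.Chars.isdigit c <;> simp [h, ih.1, ih.2, pvLoopA_true]

-- ===== VERDICT =====
theorem exercitiul_6_spec : Claim_equal_exercitiul_6 := by
  intro s _
  unfold Spec_exercitiul_6 exercitiul_6 exercitiul_6_alt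
  rw [(pvFoldB_spec s.toList).2]
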